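-- pv_equiv track=rewrite | github.com/maxdinech/perso | tpalgo5.py | somme_4
-- ===== SOURCE A (Python) =====
-- def somme_2_sorted(l1, C1, l2, C2, t):
--     i, j = 0, 0
--     c = 0
--     while i < len(l1) and j < len(l2):
--         if l1[i] + l2[j] > t:
--             j += 1
--         elif l1[i] + l2[j] < t:
--             i += 1
--         else:
--             c += C1[l1[i]] * C2[l2[j]]
--             i += 1
--             j += 1
--     return c
--
-- def somme_4(L1, L2, L3, L4, t):
--     l1 = sorted(list(set(L1)))  # Croissante
--     l2 = sorted(list(set(L2)), reverse=True)  # Décroissante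
--     l3 = sorted(list(set(L3)))  # Croissante
--     l4 = sorted(list(set(L4)), reverse=True)  # Décroissante
--     C1 = [L1.count(i) for i in range(max(L1)+1)]
--     C2 = [L2.count(i) for i in range(max(L2)+1)]
--     C3 = [L3.count(i) for i in range(max(L3)+1)]
--     C4 = [L4.count(i) for i in range(max(L4)+1)]
--     mg = min(L1) + min(L2)
--     Mg = max(L1) + max(L2)
--     md = min(L3) + min(L4)
--     Md = max(L3) + max(L4)
--     c = 0
--     for x in range(mg, Mg+1):
--         if md <= t-x <= Md:
--             c += (somme_2_sorted(l1, C1, l2, C2, x) *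
--                   somme_2_sorted(l3, C3, l4, C4, t-x))
--     return c
-- ===== SOURCE B (Python) =====
-- def _table(L):
--     d = [0] * (max(L) + 1)
--     for x in L:
--         if x >= 0:
--             d[x] += 1
--     return d
--
--
-- def _pair_dist(A, B):
--     CA = _table(A)
--     CB = _table(B)
--     d = {}
--     for a in set(A):
--         wa = CA[a]
--         for b in set(B):
--             s = a + b
--             d[s] = d.get(s, 0) + wa * CB[b]
--     return d
--
--
-- def somme_4(L1, L2, L3, L4, t):
--     left = _pair_dist(L1, L2)
--     right = _pair_dist(L3, L4)
--     return sum(v * right.get(t - s, 0) for s, v in left.items())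
-- ===== Notes on version B (the rewrite author's own statement) =====
-- stated objective: alternative
-- what changed: Instead of sorting the distinct values and re-running a two-pointer merge for every candidate pair-sum x in range(min,max+1) (with count tables built by calling L.count(i) per index), B builds each count table in one pass, forms the two pair-sum frequency dictionaries once by convolving the distinct values, and combines them in a single pass (sum of v * right[t-s] over the left distribution); asymptotically lighter on wide value ranges, though the harness could not time A on its generated family, so no speed is claimed.
-- outside the precondition, e.g. on somme_4([-5, 0], [0], [0], [0], 10): A returns 0, B raises IndexError; on somme_4([], [1], [1], [1], 2): A raises ValueError, B raises ValueError
import Mathlib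
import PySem

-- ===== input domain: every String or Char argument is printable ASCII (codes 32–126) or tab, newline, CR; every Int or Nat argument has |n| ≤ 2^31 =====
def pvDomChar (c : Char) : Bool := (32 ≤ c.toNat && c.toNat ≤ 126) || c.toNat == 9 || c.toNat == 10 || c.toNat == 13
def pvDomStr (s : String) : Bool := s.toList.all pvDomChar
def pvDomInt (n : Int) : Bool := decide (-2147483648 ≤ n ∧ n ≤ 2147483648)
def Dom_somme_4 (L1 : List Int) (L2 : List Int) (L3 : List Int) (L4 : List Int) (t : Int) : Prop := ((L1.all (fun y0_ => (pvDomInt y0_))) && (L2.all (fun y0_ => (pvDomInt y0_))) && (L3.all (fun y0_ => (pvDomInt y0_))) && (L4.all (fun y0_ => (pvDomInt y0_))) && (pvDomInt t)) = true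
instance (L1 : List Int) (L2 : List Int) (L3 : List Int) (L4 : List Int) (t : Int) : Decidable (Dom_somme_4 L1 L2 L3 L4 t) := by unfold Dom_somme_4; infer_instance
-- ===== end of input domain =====

-- B replaces A's scan over every candidate pair-sum x (with a two-pointer merge per x) by two
-- pair-sum frequency dictionaries built once from one-pass count tables and combined in a
-- single pass (objective: alternative).

-- ===== PORT A =====
-- the `while i < len(l1) and j < len(l2)` two-pointer loop of somme_2_sorted.
-- C[l[i]] is Python list indexing: PySem.List.pyGet? (negative indices wrap); the `.getD 0`
-- default is reached only where Python raises IndexError — such inputs are outside Pre_somme_4.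
def pvS2Loop (l1 C1 l2 C2 : List Int) (t : Int) (i j : Nat) (c : Int) : Int :=
  if _h : i < l1.length ∧ j < l2.length then
    if l1.getD i 0 + l2.getD j 0 > t then
      pvS2Loop l1 C1 l2 C2 t i (j + 1) c
    else if l1.getD i 0 + l2.getD j 0 < t then
      pvS2Loop l1 C1 l2 C2 t (i + 1) j c
    else
      pvS2Loop l1 C1 l2 C2 t (i + 1) (j + 1)
        (c + (PySem.List.pyGet? C1 (l1.getD i 0)).getD 0 * (PySem.List.pyGet? C2 (l2.getD j 0)).getD 0)
  else c
termination_by l1.length - i + (l2.length - j)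
decreasing_by all_goals omega

def somme_2_sorted (l1 C1 l2 C2 : List Int) (t : Int) : Int :=
  pvS2Loop l1 C1 l2 C2 t 0 0 0

-- max(L) / min(L); the `.getD 0` default is reached only for L = [] where Python raises
-- ValueError — outside Pre_somme_4.
def pvMaxI (L : List Int) : Int := (PySem.List.max? L (fun x => x)).getD 0
def pvMinI (L : List Int) : Int := (PySem.List.min? L (fun x => x)).getD 0

-- [L.count(i) for i in range(max(L)+1)]
def pvCountsTable (L : List Int) : List Int :=
  (PySem.List.pyRange 0 (pvMaxI L + 1)).map (fun i => (L.count i : Int))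

def somme_4 (L1 : List Int) (L2 : List Int) (L3 : List Int) (L4 : List Int) (t : Int) : Int :=
  let l1 := PySem.List.sorted (PySem.Set.ofList L1) (fun x => x) false
  let l2 := PySem.List.sorted (PySem.Set.ofList L2) (fun x => x) true
  let l3 := PySem.List.sorted (PySem.Set.ofList L3) (fun x => x) false
  let l4 := PySem.List.sorted (PySem.Set.ofList L4) (fun x => x) true
  let C1 := pvCountsTable L1
  let C2 := pvCountsTable L2
  let C3 := pvCountsTable L3
  let C4 := pvCountsTable L4
  let mg := pvMinI L1 + pvMinI L2
  let Mg := pvMaxI L1 + pvMaxI L2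
  let md := pvMinI L3 + pvMinI L4
  let Md := pvMaxI L3 + pvMaxI L4
  (PySem.List.pyRange mg (Mg + 1)).foldl
    (fun c x =>
      if md ≤ t - x ∧ t - x ≤ Md then
        c + somme_2_sorted l1 C1 l2 C2 x * somme_2_sorted l3 C3 l4 C4 (t - x)
      else c) 0

-- ===== PORT B =====
-- d = [0]*(max(L)+1); for x in L: if x >= 0: d[x] += 1
def pvTable (L : List Int) : List Int :=
  L.foldl (fun d x => if 0 ≤ x then d.set x.toNat (d.getD x.toNat 0 + 1) else d)
    (List.replicate (pvMaxI L + 1).toNat 0)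

-- CA[a] / CB[b] — the same Python list indexing as in A's inner loop (pyGet?; `.getD 0` is
-- reached only where Python raises IndexError, outside Pre_somme_4); iterating Python's set(A)
-- is ported as a fold over PySem.Set.ofList — the resulting dict is only summed afterwards,
-- so the result does not depend on the set's iteration order.
def pvPairDist (A B : List Int) : PySem.Dict Int Int :=
  let CA := pvTable A
  let CB := pvTable B
  (PySem.Set.ofList A).foldl
    (fun d a =>
      (PySem.Set.ofList B).foldl
        (fun d b => d.insert (a + b)
          (d.getD (a + b) 0 + (PySem.List.pyGet? CA a).getD 0 * (PySem.List.pyGet? CB b).getD 0)) d)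
    PySem.Dict.empty

def somme_4_alt (L1 : List Int) (L2 : List Int) (L3 : List Int) (L4 : List Int) (t : Int) : Int :=
  let left := pvPairDist L1 L2
  let right := pvPairDist L3 L4
  (left.items.map (fun p => p.2 * right.getD (t - p.1) 0)).sum

-- ===== PRECONDITION & SPEC =====
-- Pre_ excludes (a) empty lists, where A raises ValueError on max([]), and (b) lists with an
-- element e < -(max(L)+1), for which any count-table lookup C[e] is out of range: there B's
-- lookup always raises IndexError, and A raises IndexError too whenever such an element is
-- paired into the reachable window — on the remaining such inputs A happens to return only
-- because the loop never reaches the lookup (see the cite in claim.json).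
def Pre_somme_4 (L1 : List Int) (L2 : List Int) (L3 : List Int) (L4 : List Int) (_t : Int) : Prop :=
  L1 ≠ [] ∧ L2 ≠ [] ∧ L3 ≠ [] ∧ L4 ≠ [] ∧
  (∀ e ∈ L1, 0 ≤ pvMaxI L1 + 1 + e) ∧ (∀ e ∈ L2, 0 ≤ pvMaxI L2 + 1 + e) ∧
  (∀ e ∈ L3, 0 ≤ pvMaxI L3 + 1 + e) ∧ (∀ e ∈ L4, 0 ≤ pvMaxI L4 + 1 + e)

instance (L1 : List Int) (L2 : List Int) (L3 : List Int) (L4 : List Int) (t : Int) :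
    Decidable (Pre_somme_4 L1 L2 L3 L4 t) := by unfold Pre_somme_4; infer_instance

def pvWitness_somme_4 : List Int × List Int × List Int × List Int × Int :=
  ([0, 2], [1], [2], [0, 3], 4)

def Spec_somme_4 (L1 : List Int) (L2 : List Int) (L3 : List Int) (L4 : List Int) (t : Int) (out : Int) : Prop := out = somme_4_alt L1 L2 L3 L4 t
instance (L1 : List Int) (L2 : List Int) (L3 : List Int) (L4 : List Int) (t : Int) (out : Int) : Decidable (Spec_somme_4 L1 L2 L3 L4 t out) := by unfold Spec_somme_4; infer_instance

-- ===== CLAIM (what is proved, stated in full; the proofs are below) =====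
def Claim_equal_somme_4 : Prop := ∀ (L1 : List Int) (L2 : List Int) (L3 : List Int) (L4 : List Int) (t : Int), Dom_somme_4 L1 L2 L3 L4 t → Pre_somme_4 L1 L2 L3 L4 t → Spec_somme_4 L1 L2 L3 L4 t (somme_4 L1 L2 L3 L4 t)


-- ===== LEMMAS AND PROOFS =====

-- the Python-side weight C[a] as an Int
def pvW (C : List Int) (a : Int) : Int := (PySem.List.pyGet? C a).getD 0

-- the effective value a Python index a reads from a count table of L
def pvWrap (L : List Int) (a : Int) : Int := if 0 ≤ a then a else pvMaxI L + 1 + a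

-- the weighted number of distinct-value pairs of A × B summing to s, with A's table weights —
-- the common yardstick of both programs
def pvQ (A B : List Int) (s : Int) : Int :=
  ((PySem.Set.ofList A).map (fun a => ((PySem.Set.ofList B).map (fun b =>
    if a + b = s then pvW (pvCountsTable A) a * pvW (pvCountsTable B) b else 0)).sum)).sum

-- the common normal form both programs are reduced to
def pvR (L1 L2 L3 L4 : List Int) (t : Int) : Int :=
  ((PySem.Set.ofList L1).map (fun a => ((PySem.Set.ofList L2).map (fun b =>
    pvW (pvCountsTable L1) a * pvW (pvCountsTable L2) b * pvQ L3 L4 (t - (a + b)))).sum)).sum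

-- the double sum the two-pointer loop computes from positions (i, j) on
def pvTT (l1 l2 : List Int) (w1 w2 : Int → Int) (t : Int) (i j : Nat) : Int :=
  ((l1.drop i).map (fun a => ((l2.drop j).map (fun b => if a + b = t then w1 a * w2 b else 0)).sum)).sum

lemma pv_sum_comm {α β : Type} (K : List α) (A : List β) (f : α → β → Int) :
    (K.map (fun k => (A.map (f k)).sum)).sum = (A.map (fun a => (K.map (fun k => f k a)).sum)).sum := by
  induction K with
  | nil => simp
  | cons k ks ih =>
    simp only [List.map_cons, List.sum_cons, ih, ← PySem.List.sum_map_add_int]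

lemma pv_sum_ite_nodup (K : List Int) (hnd : K.Nodup) (s : Int) (hs : s ∈ K) (h : Int → Int) :
    (K.map (fun k => if s = k then h k else 0)).sum = h s := by
  induction K with
  | nil => cases hs
  | cons k ks ih =>
    rcases List.mem_cons.1 hs with rfl | hmem
    · rw [List.map_cons, List.sum_cons, if_pos rfl]
      have hz : ∀ k' ∈ ks, (if s = k' then h k' else 0) = 0 := by
        intro k' hk'
        exact if_neg (by rintro rfl; exact (List.nodup_cons.1 hnd).1 hk')
      rw [List.map_congr_left hz]
      simp
    · have hne : s ≠ k := by rintro rfl; exact (List.nodup_cons.1 hnd).1 hmem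
      simp only [List.map_cons, List.sum_cons, if_neg hne, zero_add]
      exact ih (List.nodup_cons.1 hnd).2 hmem

lemma pv_pairwise_drop_head {l : List Int} {r : Int → Int → Prop} (h : l.Pairwise r) {i : Nat}
    (hi : i < l.length) : ∀ a ∈ l.drop (i + 1), r l[i] a := by
  have h2 : (l.drop i).Pairwise r := List.Pairwise.sublist (List.drop_sublist i l) h
  rw [List.drop_eq_getElem_cons hi] at h2
  exact (List.pairwise_cons.1 h2).1

lemma pv_mem_drop_le {l : List Int} (h : l.Pairwise (· < ·)) {i : Nat} (hi : i < l.length) :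
    ∀ a ∈ l.drop i, l[i] ≤ a := by
  intro a ha
  rw [List.drop_eq_getElem_cons hi] at ha
  rcases List.mem_cons.1 ha with rfl | ha'
  · exact le_refl _
  · exact le_of_lt (pv_pairwise_drop_head h hi a ha')

lemma pv_mem_drop_ge {l : List Int} (h : l.Pairwise (fun a b => b < a)) {j : Nat} (hj : j < l.length) :
    ∀ b ∈ l.drop j, b ≤ l[j] := by
  intro b hb
  rw [List.drop_eq_getElem_cons hj] at hb
  rcases List.mem_cons.1 hb with rfl | hb'
  · exact le_refl _
  · exact le_of_lt (pv_pairwise_drop_head h hj b hb')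

lemma pvTT_nil (l1 l2 : List Int) (w1 w2 : Int → Int) (t : Int) (i j : Nat)
    (h : ¬(i < l1.length ∧ j < l2.length)) : pvTT l1 l2 w1 w2 t i j = 0 := by
  unfold pvTT
  rcases not_and_or.1 h with h1 | h2
  · rw [show l1.drop i = [] from List.drop_eq_nil_of_le (by omega)]; simp
  · rw [show l2.drop j = [] from List.drop_eq_nil_of_le (by omega)]
    simp

lemma pvTT_drop_j (l1 l2 : List Int) (w1 w2 : Int → Int) (t : Int) (i j : Nat)
    (hj : j < l2.length) (hz : ∀ a ∈ l1.drop i, a + l2[j] ≠ t) :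
    pvTT l1 l2 w1 w2 t i j = pvTT l1 l2 w1 w2 t i (j + 1) := by
  unfold pvTT
  apply congrArg
  apply List.map_congr_left
  intro a ha
  rw [List.drop_eq_getElem_cons hj, List.map_cons, List.sum_cons, if_neg (hz a ha), zero_add]

lemma pvTT_drop_i (l1 l2 : List Int) (w1 w2 : Int → Int) (t : Int) (i j : Nat)
    (hi : i < l1.length) (hz : ∀ b ∈ l2.drop j, l1[i] + b ≠ t) :
    pvTT l1 l2 w1 w2 t i j = pvTT l1 l2 w1 w2 t (i + 1) j := by
  unfold pvTT
  rw [List.drop_eq_getElem_cons hi, List.map_cons, List.sum_cons]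
  have hz' : ∀ b ∈ l2.drop j, (if l1[i] + b = t then w1 l1[i] * w2 b else 0) = 0 :=
    fun b hb => if_neg (hz b hb)
  rw [List.map_congr_left hz']
  simp

lemma pvS2Loop_eq (l1 C1 l2 C2 : List Int) (t : Int)
    (h1 : l1.Pairwise (· < ·)) (h2 : l2.Pairwise (fun a b => b < a)) (i j : Nat) (c : Int) :
    pvS2Loop l1 C1 l2 C2 t i j c = c + pvTT l1 l2 (pvW C1) (pvW C2) t i j := by
  fun_induction pvS2Loop l1 C1 l2 C2 t i j c with
  | case1 i j c h hgt ih =>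
    rw [ih]
    congr 1
    have hj : j < l2.length := h.2
    rw [List.getD_eq_getElem l1 0 h.1, List.getD_eq_getElem l2 0 hj] at hgt
    exact (pvTT_drop_j l1 l2 _ _ t i j hj (fun a ha => by
      have := pv_mem_drop_le h1 h.1 a ha
      omega)).symm
  | case2 i j c h hgt hlt ih =>
    rw [ih]
    congr 1
    have hi : i < l1.length := h.1
    rw [List.getD_eq_getElem l1 0 hi, List.getD_eq_getElem l2 0 h.2] at hlt
    exact (pvTT_drop_i l1 l2 _ _ t i j hi (fun b hb => by
      have := pv_mem_drop_ge h2 h.2 b hb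
      omega)).symm
  | case3 i j c h hgt hlt ih =>
    rw [ih]
    have hi : i < l1.length := h.1
    have hj : j < l2.length := h.2
    have heq : l1[i] + l2[j] = t := by
      rw [List.getD_eq_getElem l1 0 hi, List.getD_eq_getElem l2 0 hj] at hgt hlt
      omega
    have step1 : pvTT l1 l2 (pvW C1) (pvW C2) t (i+1) j = pvTT l1 l2 (pvW C1) (pvW C2) t (i+1) (j+1) := by
      apply pvTT_drop_j l1 l2 _ _ t (i+1) j hj
      intro a ha
      have := pv_pairwise_drop_head h1 hi a ha
      omega
    have step2 : pvTT l1 l2 (pvW C1) (pvW C2) t i j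
        = pvW C1 l1[i] * pvW C2 l2[j] + pvTT l1 l2 (pvW C1) (pvW C2) t (i+1) j := by
      unfold pvTT
      rw [List.drop_eq_getElem_cons hi, List.map_cons, List.sum_cons]
      congr 1
      rw [List.drop_eq_getElem_cons hj, List.map_cons, List.sum_cons, if_pos heq]
      have hz : ∀ b ∈ l2.drop (j+1), (if l1[i] + b = t then pvW C1 l1[i] * pvW C2 b else 0) = 0 := by
        intro b hb
        have := pv_pairwise_drop_head h2 hj b hb
        exact if_neg (by omega)
      rw [List.map_congr_left hz]
      simp
    rw [step2, step1]
    rw [List.getD_eq_getElem l1 0 hi, List.getD_eq_getElem l2 0 hj]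
    unfold pvW
    ring
  | case4 i j c h =>
    rw [pvTT_nil l1 l2 _ _ t i j h]
    ring

lemma pv_le_max {A : List Int} (hA : A ≠ []) {a : Int} (ha : a ∈ A) : a ≤ pvMaxI A := by
  cases h : PySem.List.max? A (fun x => x) with
  | none => exact absurd ((PySem.List.max?_eq_none_iff A _).1 h) hA
  | some m =>
    have := PySem.List.max?_isMax h a ha
    simpa [pvMaxI, h] using this

lemma pv_min_le {A : List Int} (hA : A ≠ []) {a : Int} (ha : a ∈ A) : pvMinI A ≤ a := by
  cases h : PySem.List.min? A (fun x => x) with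
  | none => exact absurd ((PySem.List.min?_eq_none_iff A _).1 h) hA
  | some m =>
    have := PySem.List.min?_isMin h a ha
    simpa [pvMinI, h] using this

lemma somme_2_spec (A B : List Int) (s : Int) :
    somme_2_sorted (PySem.List.sorted (PySem.Set.ofList A) (fun x => x) false) (pvCountsTable A)
      (PySem.List.sorted (PySem.Set.ofList B) (fun x => x) true) (pvCountsTable B) s
      = pvQ A B s := by
  set l1 := PySem.List.sorted (PySem.Set.ofList A) (fun x => x) false with hl1
  set l2 := PySem.List.sorted (PySem.Set.ofList B) (fun x => x) true with hl2
  have hpermA : l1.Perm (PySem.Set.ofList A) := PySem.List.sorted_perm _ _ _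
  have hpermB : l2.Perm (PySem.Set.ofList B) := PySem.List.sorted_perm _ _ _
  have hnd1 : l1.Nodup := hpermA.nodup_iff.2 (PySem.Set.nodup_ofList A)
  have hnd2 : l2.Nodup := hpermB.nodup_iff.2 (PySem.Set.nodup_ofList B)
  have hs1 : l1.Pairwise (· < ·) := by
    have hle : l1.Pairwise (fun a b => a ≤ b) := PySem.List.sorted_pairwise _ _
    have := List.Pairwise.and hle hnd1
    exact this.imp (fun h => lt_of_le_of_ne h.1 h.2)
  have hs2 : l2.Pairwise (fun a b => b < a) := by
    have hle : l2.Pairwise (fun a b => b ≤ a) := PySem.List.sorted_pairwise_rev _ _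
    have := List.Pairwise.and hle hnd2
    exact this.imp (fun h => lt_of_le_of_ne h.1 (Ne.symm h.2))
  rw [somme_2_sorted, pvS2Loop_eq _ _ _ _ _ hs1 hs2, zero_add]
  unfold pvTT pvQ
  simp only [List.drop_zero]
  have hinner : ∀ a ∈ l1,
      ((l2.map (fun b => if a + b = s then pvW (pvCountsTable A) a * pvW (pvCountsTable B) b else 0)).sum)
      = (((PySem.Set.ofList B).map (fun b => if a + b = s then pvW (pvCountsTable A) a * pvW (pvCountsTable B) b else 0)).sum) := by
    intro a _
    exact (hpermB.map _).sum_eq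
  rw [List.map_congr_left hinner]
  exact (hpermA.map _).sum_eq

lemma pvQ_eq_zero (A B : List Int) (hA : A ≠ []) (hB : B ≠ []) (s : Int)
    (h : s < pvMinI A + pvMinI B ∨ pvMaxI A + pvMaxI B < s) : pvQ A B s = 0 := by
  unfold pvQ
  have hout : ∀ a ∈ PySem.Set.ofList A,
      (((PySem.Set.ofList B).map (fun b =>
        if a + b = s then pvW (pvCountsTable A) a * pvW (pvCountsTable B) b else 0)).sum) = 0 := by
    intro a ha
    have ha' : a ∈ A := (PySem.Set.mem_ofList A a).1 ha
    have hz : ∀ b ∈ PySem.Set.ofList B,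
        (if a + b = s then pvW (pvCountsTable A) a * pvW (pvCountsTable B) b else 0) = 0 := by
      intro b hb
      have hb' : b ∈ B := (PySem.Set.mem_ofList B b).1 hb
      have h1 := pv_le_max hA ha'
      have h2 := pv_min_le hA ha'
      have h3 := pv_le_max hB hb'
      have h4 := pv_min_le hB hb'
      exact if_neg (by omega)
    rw [List.map_congr_left hz]
    simp
  rw [List.map_congr_left hout]
  simp

lemma pv_support_sum (K X Y : List Int) (w1 w2 : Int → Int) (hnd : K.Nodup)
    (hsupp : ∀ a ∈ X, ∀ b ∈ Y, a + b ∈ K) (h : Int → Int) :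
    (K.map (fun k =>
      (X.map (fun a => (Y.map (fun b => if a + b = k then w1 a * w2 b else 0)).sum)).sum * h k)).sum
      = (X.map (fun a => (Y.map (fun b => w1 a * w2 b * h (a + b))).sum)).sum := by
  have step1 : ∀ k ∈ K,
      (X.map (fun a => (Y.map (fun b => if a + b = k then w1 a * w2 b else 0)).sum)).sum * h k
      = (X.map (fun a => (Y.map (fun b => if a + b = k then w1 a * w2 b * h k else 0)).sum)).sum := by
    intro k _
    rw [← List.sum_map_mul_right]
    apply congrArg
    apply List.map_congr_left
    intro a _
    rw [← List.sum_map_mul_right]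
    apply congrArg
    apply List.map_congr_left
    intro b _
    split <;> ring
  rw [List.map_congr_left step1]
  rw [pv_sum_comm K X (fun k a => (Y.map (fun b => if a + b = k then w1 a * w2 b * h k else 0)).sum)]
  apply congrArg
  apply List.map_congr_left
  intro a ha
  rw [pv_sum_comm K Y (fun k b => if a + b = k then w1 a * w2 b * h k else 0)]
  apply congrArg
  apply List.map_congr_left
  intro b hb
  exact pv_sum_ite_nodup K hnd (a + b) (hsupp a ha b hb) (fun k => w1 a * w2 b * h k)

lemma somme_4_eq_target (L1 L2 L3 L4 : List Int) (t : Int)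
    (h1 : L1 ≠ []) (h2 : L2 ≠ []) (h3 : L3 ≠ []) (h4 : L4 ≠ []) :
    somme_4 L1 L2 L3 L4 t = pvR L1 L2 L3 L4 t := by
  unfold somme_4
  set mg := pvMinI L1 + pvMinI L2 with hmg
  set Mg := pvMaxI L1 + pvMaxI L2 with hMg
  set md := pvMinI L3 + pvMinI L4 with hmd
  set Md := pvMaxI L3 + pvMaxI L4 with hMd
  have hbody : ∀ (c : Int), ∀ x ∈ PySem.List.pyRange mg (Mg + 1),
      (if md ≤ t - x ∧ t - x ≤ Md then
        c + somme_2_sorted (PySem.List.sorted (PySem.Set.ofList L1) (fun x => x) false) (pvCountsTable L1)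
              (PySem.List.sorted (PySem.Set.ofList L2) (fun x => x) true) (pvCountsTable L2) x
          * somme_2_sorted (PySem.List.sorted (PySem.Set.ofList L3) (fun x => x) false) (pvCountsTable L3)
              (PySem.List.sorted (PySem.Set.ofList L4) (fun x => x) true) (pvCountsTable L4) (t - x)
      else c)
      = c + ((PySem.Set.ofList L1).map (fun a => ((PySem.Set.ofList L2).map (fun b =>
          if a + b = x then pvW (pvCountsTable L1) a * pvW (pvCountsTable L2) b else 0)).sum)).sum
          * (if md ≤ t - x ∧ t - x ≤ Md then pvQ L3 L4 (t - x) else 0) := by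
    intro c x _
    rw [somme_2_spec L1 L2 x, somme_2_spec L3 L4 (t - x)]
    show _ = c + pvQ L1 L2 x * _
    split
    · ring
    · ring
  rw [PySem.List.foldl_congr_mem _ _ _ _ hbody,
      PySem.List.foldl_add _ _ 0, zero_add,
      pv_support_sum _ (PySem.Set.ofList L1) (PySem.Set.ofList L2) _ _
        (PySem.List.nodup_pyRange_one mg (Mg + 1))
        (fun a ha b hb => PySem.List.mem_pyRange_one.2
          ⟨by
            have := pv_min_le h1 ((PySem.Set.mem_ofList L1 a).1 ha)
            have := pv_min_le h2 ((PySem.Set.mem_ofList L2 b).1 hb)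
            omega,
           by
            have := pv_le_max h1 ((PySem.Set.mem_ofList L1 a).1 ha)
            have := pv_le_max h2 ((PySem.Set.mem_ofList L2 b).1 hb)
            omega⟩)]
  unfold pvR
  apply congrArg
  apply List.map_congr_left
  intro a _
  apply congrArg
  apply List.map_congr_left
  intro b _
  by_cases hg : md ≤ t - (a + b) ∧ t - (a + b) ≤ Md
  · rw [if_pos hg]
  · rw [if_neg hg, pvQ_eq_zero L3 L4 h3 h4 _ (by omega)]

lemma pvW_of_entries {A C : List Int} (hlen : (C.length : Int) = pvMaxI A + 1)
    (helem : ∀ k : Nat, k < C.length → C[k]? = some ((A.count (k : Int) : Int)))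
    {a : Int} (hlo : 0 ≤ pvMaxI A + 1 + a) (hhi : a ≤ pvMaxI A) :
    pvW C a = (A.count (pvWrap A a) : Int) := by
  unfold pvW PySem.List.pyGet? PySem.List.pyIdx? pvWrap
  by_cases h0 : 0 ≤ a
  · rw [if_pos h0, if_pos (by omega : a < (C.length : Int)), if_pos h0]
    have hk : a.toNat < C.length := by omega
    simp only [Option.bind_some]
    rw [helem a.toNat hk]
    simp [Int.toNat_of_nonneg h0]
  · rw [if_neg h0, if_pos (by omega : -(C.length : Int) ≤ a), if_neg h0]
    have hk : C.length - (-a).toNat < C.length := by omega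
    simp only [Option.bind_some]
    rw [helem _ hk]
    have : ((C.length - (-a).toNat : Nat) : Int) = pvMaxI A + 1 + a := by omega
    rw [this]
    simp

lemma countsTable_length {A : List Int} (hM : 0 ≤ pvMaxI A) :
    ((pvCountsTable A).length : Int) = pvMaxI A + 1 := by
  unfold pvCountsTable
  rw [show pvMaxI A + 1 = (((pvMaxI A + 1).toNat : Nat) : Int) by omega,
      PySem.List.pyRange_zero_natCast]
  simp

lemma countsTable_entries {A : List Int} (hM : 0 ≤ pvMaxI A) (k : Nat)
    (hk : k < (pvCountsTable A).length) :
    (pvCountsTable A)[k]? = some ((A.count (k : Int) : Int)) := by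
  unfold pvCountsTable at *
  rw [show pvMaxI A + 1 = (((pvMaxI A + 1).toNat : Nat) : Int) by omega,
      PySem.List.pyRange_zero_natCast] at *
  simp only [List.getElem?_map]
  simp only [List.length_map, List.length_range] at hk
  rw [List.getElem?_range hk]
  rfl

lemma table_fold_length (L : List Int) (d : List Int) :
    (L.foldl (fun d x => if 0 ≤ x then d.set x.toNat (d.getD x.toNat 0 + 1) else d) d).length
      = d.length := by
  induction L generalizing d with
  | nil => rfl
  | cons x xs ih =>
    rw [List.foldl_cons]
    by_cases h : 0 ≤ x
    · rw [if_pos h, ih, List.length_set]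
    · rw [if_neg h, ih]

lemma table_fold_entry (L : List Int) (d : List Int) (k : Nat) (hk : k < d.length)
    (hin : ∀ x ∈ L, 0 ≤ x → x < (d.length : Int)) :
    (L.foldl (fun d x => if 0 ≤ x then d.set x.toNat (d.getD x.toNat 0 + 1) else d) d).getD k 0
      = d.getD k 0 + (L.count (k : Int) : Int) := by
  induction L generalizing d with
  | nil => simp
  | cons x xs ih =>
    rw [List.foldl_cons]
    have hxs : ∀ y ∈ xs, 0 ≤ y → y < (d.length : Int) :=
      fun y hy => hin y (List.mem_cons_of_mem _ hy)
    by_cases h : 0 ≤ x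
    · rw [if_pos h]
      have hxlt : x.toNat < d.length := by
        have := hin x List.mem_cons_self h
        omega
      rw [ih _ (by rw [List.length_set]; exact hk)
            (by intro y hy h0; rw [List.length_set]; exact hxs y hy h0)]
      have hset : (d.set x.toNat (d.getD x.toNat 0 + 1)).getD k 0
          = if x.toNat = k then d.getD k 0 + 1 else d.getD k 0 := by
        by_cases he : x.toNat = k
        · subst he
          simp [List.getD_eq_getElem?_getD, hxlt]
        · simp [List.getD_eq_getElem?_getD, he]
      rw [hset]
      have hcx : ((x :: xs).count (k : Int) : Int)
          = (xs.count (k : Int) : Int) + (if x.toNat = k then 1 else 0) := by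
        by_cases he : x.toNat = k
        · have hx : x = (k : Int) := by omega
          simp [hx]
        · have hx : ¬ (x = (k : Int)) := by omega
          simp [hx, he]
      rw [hcx]
      split <;> ring
    · rw [if_neg h, ih _ hk hxs]
      have : ((x :: xs).count (k : Int) : Int) = (xs.count (k : Int) : Int) := by
        have hx : ¬ (x = (k : Int)) := by omega
        simp [hx]
      rw [this]

lemma table_length {A : List Int} (hM : 0 ≤ pvMaxI A) :
    ((pvTable A).length : Int) = pvMaxI A + 1 := by
  unfold pvTable
  rw [table_fold_length, List.length_replicate]
  omega

lemma table_entries {A : List Int} (hM : 0 ≤ pvMaxI A) (hA : A ≠ []) (k : Nat)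
    (hk : k < (pvTable A).length) :
    (pvTable A)[k]? = some ((A.count (k : Int) : Int)) := by
  have hlen : (pvTable A).length = (pvMaxI A + 1).toNat := by
    unfold pvTable; rw [table_fold_length, List.length_replicate]
  have hk' : k < (List.replicate (pvMaxI A + 1).toNat (0 : Int)).length := by
    rw [List.length_replicate]; omega
  have hentry : (pvTable A).getD k 0 = (A.count (k : Int) : Int) := by
    unfold pvTable
    rw [table_fold_entry A _ k hk' ?_]
    · simp only [List.getD_eq_getElem?_getD, List.getElem?_replicate]
      split <;> simp
    · intro x hx h0
      have := pv_le_max hA hx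
      rw [List.length_replicate]
      omega
  rw [List.getD_eq_getElem?_getD] at hentry
  cases hgk : (pvTable A)[k]? with
  | none => rw [List.getElem?_eq_none_iff] at hgk; omega
  | some v => rw [hgk] at hentry; simp at hentry; rw [hentry]

lemma pv_max_nonneg {A : List Int} (hA : A ≠ []) (hsafe : ∀ e ∈ A, 0 ≤ pvMaxI A + 1 + e) :
    0 ≤ pvMaxI A := by
  obtain ⟨e, he⟩ := List.exists_mem_of_ne_nil A hA
  have := pv_le_max hA he
  have := hsafe e he
  omega

lemma pvW_tables_eq {A : List Int} (hA : A ≠ []) (hsafe : ∀ e ∈ A, 0 ≤ pvMaxI A + 1 + e)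
    {a : Int} (ha : a ∈ A) :
    pvW (pvTable A) a = pvW (pvCountsTable A) a := by
  have hM := pv_max_nonneg hA hsafe
  rw [pvW_of_entries (table_length hM) (table_entries hM hA) (hsafe a ha) (pv_le_max hA ha),
      pvW_of_entries (countsTable_length hM) (countsTable_entries hM) (hsafe a ha) (pv_le_max hA ha)]

lemma getD_fold_add {α : Type} (l : List α) (k : α → Int) (w : α → Int) (d : PySem.Dict Int Int)
    (v : Int) :
    (l.foldl (fun d x => d.insert (k x) (d.getD (k x) 0 + w x)) d).getD v 0
      = d.getD v 0 + (l.map (fun x => if k x = v then w x else 0)).sum := by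
  induction l generalizing d with
  | nil => simp
  | cons x xs ih =>
    rw [List.foldl_cons, ih, List.map_cons, List.sum_cons, PySem.Dict.getD_insert]
    by_cases h : v = k x
    · rw [if_pos h, if_pos h.symm, h]
      ring
    · rw [if_neg h, if_neg (Ne.symm h)]
      ring

lemma getD_pair_fold (xs ys : List Int) (w1 w2 : Int → Int) (d : PySem.Dict Int Int) (v : Int) :
    (xs.foldl (fun d a => ys.foldl
        (fun d b => d.insert (a + b) (d.getD (a + b) 0 + w1 a * w2 b)) d) d).getD v 0
      = d.getD v 0
        + (xs.map (fun a => (ys.map (fun b => if a + b = v then w1 a * w2 b else 0)).sum)).sum := by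
  induction xs generalizing d with
  | nil => simp
  | cons a xs ih =>
    rw [List.foldl_cons, ih, getD_fold_add ys (fun b => a + b) (fun b => w1 a * w2 b) d v,
        List.map_cons, List.sum_cons]
    ring

lemma getD_pairDist (A B : List Int) (hA : A ≠ []) (hB : B ≠ [])
    (hsA : ∀ e ∈ A, 0 ≤ pvMaxI A + 1 + e) (hsB : ∀ e ∈ B, 0 ≤ pvMaxI B + 1 + e) (v : Int) :
    (pvPairDist A B).getD v 0 = pvQ A B v := by
  show ((PySem.Set.ofList A).foldl _ PySem.Dict.empty).getD v 0 = _
  rw [getD_pair_fold (PySem.Set.ofList A) (PySem.Set.ofList B)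
        (fun a => (PySem.List.pyGet? (pvTable A) a).getD 0)
        (fun b => (PySem.List.pyGet? (pvTable B) b).getD 0) PySem.Dict.empty v,
      PySem.Dict.getD_empty, zero_add]
  unfold pvQ
  apply congrArg
  apply List.map_congr_left
  intro a ha
  apply congrArg
  apply List.map_congr_left
  intro b hb
  have hwa : (PySem.List.pyGet? (pvTable A) a).getD 0 = pvW (pvCountsTable A) a :=
    pvW_tables_eq hA hsA ((PySem.Set.mem_ofList A a).1 ha)
  have hwb : (PySem.List.pyGet? (pvTable B) b).getD 0 = pvW (pvCountsTable B) b :=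
    pvW_tables_eq hB hsB ((PySem.Set.mem_ofList B b).1 hb)
  rw [hwa, hwb]

lemma nodup_keys_pair_fold (xs ys : List Int) (w1 w2 : Int → Int) (d : PySem.Dict Int Int)
    (h : d.keys.Nodup) :
    (xs.foldl (fun d a => ys.foldl
        (fun d b => d.insert (a + b) (d.getD (a + b) 0 + w1 a * w2 b)) d) d).keys.Nodup := by
  induction xs generalizing d with
  | nil => exact h
  | cons a xs ih =>
    rw [List.foldl_cons]
    exact ih _ (PySem.Dict.nodup_keys_foldl_insert_key ys (fun b => a + b)
      (fun d b => d.getD (a + b) 0 + w1 a * w2 b) d h)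

lemma mem_keys_pair_fold (xs ys : List Int) (w1 w2 : Int → Int) (d : PySem.Dict Int Int) (s : Int)
    (h : s ∈ d.keys ∨ ∃ a ∈ xs, ∃ b ∈ ys, s = a + b) :
    s ∈ (xs.foldl (fun d a => ys.foldl
        (fun d b => d.insert (a + b) (d.getD (a + b) 0 + w1 a * w2 b)) d) d).keys := by
  induction xs generalizing d with
  | nil =>
    rcases h with h | ⟨a, haa, _⟩
    · exact h
    · cases haa
  | cons a xs ih =>
    rw [List.foldl_cons]
    apply ih
    rcases h with h | ⟨a', ha', b, hb, rfl⟩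
    · left
      rw [PySem.Dict.keys_foldl_insert_key ys (fun b => a + b)
        (fun d b => d.getD (a + b) 0 + w1 a * w2 b) d]
      exact (PySem.Set.mem_update _ _ _).2 (Or.inl h)
    · rcases List.mem_cons.1 ha' with rfl | ha''
      · left
        rw [PySem.Dict.keys_foldl_insert_key ys (fun b => a' + b)
          (fun d b => d.getD (a' + b) 0 + w1 a' * w2 b) d]
        exact (PySem.Set.mem_update _ _ _).2 (Or.inr (List.mem_map_of_mem hb))
      · exact Or.inr ⟨a', ha'', b, hb, rfl⟩

lemma mem_keys_pairDist {A B : List Int} {a b : Int} (ha : a ∈ A) (hb : b ∈ B) :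
    a + b ∈ (pvPairDist A B).keys := by
  show a + b ∈ ((PySem.Set.ofList A).foldl _ PySem.Dict.empty).keys
  apply mem_keys_pair_fold
  right
  exact ⟨a, (PySem.Set.mem_ofList A a).2 ha, b, (PySem.Set.mem_ofList B b).2 hb, rfl⟩

lemma nodup_keys_pairDist (A B : List Int) : (pvPairDist A B).keys.Nodup := by
  show ((PySem.Set.ofList A).foldl _ PySem.Dict.empty).keys.Nodup
  exact nodup_keys_pair_fold _ _ _ _ _ (by simp [PySem.Dict.keys_empty])

lemma somme_4_alt_eq_target (L1 L2 L3 L4 : List Int) (t : Int)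
    (h1 : L1 ≠ []) (h2 : L2 ≠ []) (h3 : L3 ≠ []) (h4 : L4 ≠ [])
    (hs1 : ∀ e ∈ L1, 0 ≤ pvMaxI L1 + 1 + e) (hs2 : ∀ e ∈ L2, 0 ≤ pvMaxI L2 + 1 + e)
    (hs3 : ∀ e ∈ L3, 0 ≤ pvMaxI L3 + 1 + e) (hs4 : ∀ e ∈ L4, 0 ≤ pvMaxI L4 + 1 + e) :
    somme_4_alt L1 L2 L3 L4 t = pvR L1 L2 L3 L4 t := by
  show ((pvPairDist L1 L2).items.map (fun p => p.2 * (pvPairDist L3 L4).getD (t - p.1) 0)).sum = _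
  rw [PySem.Dict.items_eq_map_keys (pvPairDist L1 L2) (nodup_keys_pairDist L1 L2) 0,
      List.map_map]
  have hk : ∀ k ∈ (pvPairDist L1 L2).keys,
      ((fun p => p.2 * (pvPairDist L3 L4).getD (t - p.1) 0) ∘ (fun k => (k, (pvPairDist L1 L2).getD k 0))) k
        = ((PySem.Set.ofList L1).map (fun a => ((PySem.Set.ofList L2).map (fun b =>
            if a + b = k then pvW (pvCountsTable L1) a * pvW (pvCountsTable L2) b else 0)).sum)).sum
          * pvQ L3 L4 (t - k) := by
    intro k _
    show (pvPairDist L1 L2).getD k 0 * (pvPairDist L3 L4).getD (t - k) 0 = _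
    rw [getD_pairDist L1 L2 h1 h2 hs1 hs2, getD_pairDist L3 L4 h3 h4 hs3 hs4]
    rfl
  rw [List.map_congr_left hk,
      pv_support_sum _ (PySem.Set.ofList L1) (PySem.Set.ofList L2) _ _
        (nodup_keys_pairDist L1 L2)
        (fun a ha b hb => mem_keys_pairDist ((PySem.Set.mem_ofList L1 a).1 ha)
          ((PySem.Set.mem_ofList L2 b).1 hb))]
  rfl

-- ===== VERDICT (by name: the statement is the Claim_ definition above) =====
theorem somme_4_spec : Claim_equal_somme_4 := by
  intro L1 L2 L3 L4 t _hdom hpre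
  obtain ⟨h1, h2, h3, h4, hs1, hs2, hs3, hs4⟩ := hpre
  unfold Spec_somme_4
  rw [somme_4_eq_target L1 L2 L3 L4 t h1 h2 h3 h4,
      somme_4_alt_eq_target L1 L2 L3 L4 t h1 h2 h3 h4 hs1 hs2 hs3 hs4]
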